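-- pv_equiv track=rewrite | github.com/the-utkarshjain/Speech-and-Language-Processing-3rd-Edition-Solutions | Chapter 13/utils.py | get_non_terminals_and_terminals
-- ===== SOURCE A (Python) =====
-- def get_non_terminals_and_terminals(rules):
--     all_symbols = set()
--     terminals = set()
--     non_terminals = set()
--
--     for left, right in rules:
--         all_symbols.add(left)
--         for r in right:
--             all_symbols.add(r)
--
--         non_terminals.add(left)
--
--     terminals = all_symbols - non_terminals
--
--     return non_terminals, terminals
-- ===== SOURCE B (Python) =====
-- def get_non_terminals_and_terminals(rules):
--     non_terminals = set()
--     terminals = set()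
--     for left, right in rules:
--         for r in right:
--             if r not in non_terminals:
--                 terminals.add(r)
--         non_terminals.add(left)
--         terminals.discard(left)
--     return non_terminals, terminals
-- ===== Notes on version B (the rewrite author's own statement) =====
-- stated objective: alternative
-- what changed: Single pass over the rules maintaining a provisional terminals set repaired in-flight (add right symbols not yet known to be non-terminals, then discard the rule's left symbol), instead of building an all-symbols union and subtracting the non-terminals at the end.
import Mathlib
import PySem

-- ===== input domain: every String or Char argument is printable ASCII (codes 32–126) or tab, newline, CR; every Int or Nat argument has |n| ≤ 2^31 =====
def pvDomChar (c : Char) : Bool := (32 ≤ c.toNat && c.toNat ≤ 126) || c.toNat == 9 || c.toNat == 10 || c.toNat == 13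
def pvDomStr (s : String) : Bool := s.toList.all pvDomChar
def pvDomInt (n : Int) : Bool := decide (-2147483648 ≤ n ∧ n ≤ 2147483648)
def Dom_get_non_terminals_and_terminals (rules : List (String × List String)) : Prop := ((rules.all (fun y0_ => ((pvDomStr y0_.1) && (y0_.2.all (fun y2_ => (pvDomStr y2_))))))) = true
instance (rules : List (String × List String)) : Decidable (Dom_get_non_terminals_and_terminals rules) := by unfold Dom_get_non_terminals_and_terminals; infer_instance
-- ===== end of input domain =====

-- B makes a single pass maintaining a provisional terminals set repaired in-flight (discard the
-- left symbol as soon as it is known to be a non-terminal), instead of A's union-then-subtract.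
-- ===== PORT A =====
def get_non_terminals_and_terminals (rules : List (String × List String)) : List String × List String :=
  let st := rules.foldl
    (fun (st : PySem.Set String × PySem.Set String) lr =>
      (lr.2.foldl PySem.Set.add (PySem.Set.add st.1 lr.1), PySem.Set.add st.2 lr.1))
    (PySem.Set.empty, PySem.Set.empty)
  let terminals := PySem.Set.diff st.1 st.2
  (st.2, terminals)

-- ===== PORT B =====
def get_non_terminals_and_terminals_alt (rules : List (String × List String)) : List String × List String :=
  rules.foldl
    (fun (st : PySem.Set String × PySem.Set String) lr =>
      let t := lr.2.foldl
        (fun (t : PySem.Set String) r =>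
          if PySem.Set.contains st.1 r then t else PySem.Set.add t r) st.2
      (PySem.Set.add st.1 lr.1, PySem.Set.discard t lr.1))
    (PySem.Set.empty, PySem.Set.empty)

-- ===== PRECONDITION & SPEC =====
def Spec_get_non_terminals_and_terminals (rules : List (String × List String)) (out : List String × List String) : Prop := out = get_non_terminals_and_terminals_alt rules
instance (rules : List (String × List String)) (out : List String × List String) : Decidable (Spec_get_non_terminals_and_terminals rules out) := by unfold Spec_get_non_terminals_and_terminals; infer_instance

-- ===== CLAIM (what is proved, stated in full; the proofs are below) =====
def Claim_equal_get_non_terminals_and_terminals : Prop := ∀ (rules : List (String × List String)), Dom_get_non_terminals_and_terminals rules → Spec_get_non_terminals_and_terminals rules (get_non_terminals_and_terminals rules)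

-- ===== LEMMAS AND PROOFS =====

-- filter commutes with Set.add
theorem pvFilter_add (p : String → Bool) (s : PySem.Set String) (x : String) :
    List.filter p (PySem.Set.add s x)
      = if p x then PySem.Set.add (s.filter p) x else s.filter p := by
  by_cases hx : x ∈ s
  · rw [PySem.Set.add_of_mem hx]
    by_cases hp : p x = true
    · rw [if_pos hp, PySem.Set.add_of_mem (by simp [List.mem_filter, hx, hp])]
    · simp at hp
      rw [if_neg (by simp [hp])]
  · rw [PySem.Set.add_of_not_mem hx]
    by_cases hp : p x = true
    · rw [if_pos hp, PySem.Set.add_of_not_mem (by simp [List.mem_filter, hx]),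
        List.filter_append]
      simp [hp]
    · simp at hp
      rw [if_neg (by simp [hp]), List.filter_append]
      simp [hp]

-- filter by the non-terminal set commutes with a fold of plain adds, turning it into B's conditional fold
theorem pvFilter_inner (NT : PySem.Set String) (rights : List String) (t : PySem.Set String) :
    List.filter (fun x => !NT.contains x) (rights.foldl PySem.Set.add t)
      = rights.foldl
          (fun t r => if PySem.Set.contains NT r then t else PySem.Set.add t r)
          (t.filter (fun x => !NT.contains x)) := by
  induction rights generalizing t with
  | nil => rfl
  | cons r rest ih =>
    rw [List.foldl_cons, ih, List.foldl_cons, pvFilter_add]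
    by_cases hc : r ∈ NT <;> simp [hc]

-- the conditional fold, viewed through 'filter (≠ l)', only depends on the seed through
-- 'filter (≠ l)' and membership of symbols other than l
theorem pvAgree (NT : PySem.Set String) (l : String) (rights : List String)
    (s1 s2 : List String)
    (hf : s1.filter (fun y => !(y == l)) = s2.filter (fun y => !(y == l)))
    (hm : ∀ r, r ≠ l → (r ∈ s1 ↔ r ∈ s2)) :
    List.filter (fun y => !(y == l))
        (rights.foldl (fun t r => if PySem.Set.contains NT r then t else PySem.Set.add t r) s1)
      = List.filter (fun y => !(y == l))
        (rights.foldl (fun t r => if PySem.Set.contains NT r then t else PySem.Set.add t r) s2) := by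
  induction rights generalizing s1 s2 with
  | nil => exact hf
  | cons r rest ih =>
    rw [List.foldl_cons, List.foldl_cons]
    by_cases hc : PySem.Set.contains NT r = true
    · rw [if_pos hc, if_pos hc]; exact ih s1 s2 hf hm
    · rw [if_neg hc, if_neg hc]
      apply ih
      · rw [pvFilter_add, pvFilter_add]
        by_cases hr : (r == l) = true
        · simp [hr, hf]
        · simp [hr, hf]
      · intro x hx
        have := hm x hx
        simp [PySem.Set.mem_add, this]

-- one rule's step: B's new terminal set is the filtered form of A's new all-symbols set
theorem pvStep (NT all : PySem.Set String) (l : String) (rights : List String) :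
    PySem.Set.discard
        (rights.foldl (fun t r => if PySem.Set.contains NT r then t else PySem.Set.add t r)
          (all.filter (fun x => !NT.contains x))) l
      = (rights.foldl PySem.Set.add (PySem.Set.add all l)).filter
          (fun x => !(PySem.Set.add NT l).contains x) := by
  have hsplit : ∀ xs : List String,
      xs.filter (fun x => !(PySem.Set.add NT l).contains x)
        = (xs.filter (fun x => !NT.contains x)).filter (fun y => !(y == l)) := by
    intro xs
    rw [List.filter_filter]
    apply List.filter_congr
    intro x _
    by_cases h1 : x ∈ PySem.Set.add NT l
    · rw [PySem.Set.mem_add] at h1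
      rcases h1 with h1 | h1
      · simp [h1, PySem.Set.mem_add]
      · subst h1; simp [PySem.Set.mem_add]
    · rw [PySem.Set.mem_add] at h1
      rw [not_or] at h1
      simp [h1.1, h1.2]
  rw [hsplit, pvFilter_inner]
  show List.filter (fun y => !(y == l)) _ = _
  apply pvAgree
  · rw [pvFilter_add]
    by_cases hl : l ∈ NT
    · simp [hl]
    · rw [if_pos (by simp [hl]), pvFilter_add]
      simp
  · intro r hr
    rw [pvFilter_add]
    by_cases hl : l ∈ NT
    · simp [hl]
    · rw [if_pos (by simp [hl])]
      simp [PySem.Set.mem_add, hr]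

-- the loop invariant: B's state is (A's non-terminals, A's all-symbols filtered by them)
theorem pvInv (rules : List (String × List String)) (all nt : PySem.Set String) :
    rules.foldl
      (fun (st : PySem.Set String × PySem.Set String) lr =>
        let t := lr.2.foldl
          (fun (t : PySem.Set String) r =>
            if PySem.Set.contains st.1 r then t else PySem.Set.add t r) st.2
        (PySem.Set.add st.1 lr.1, PySem.Set.discard t lr.1))
      (nt, all.filter (fun x => !nt.contains x))
    = ((rules.foldl
          (fun (st : PySem.Set String × PySem.Set String) lr =>
            (lr.2.foldl PySem.Set.add (PySem.Set.add st.1 lr.1), PySem.Set.add st.2 lr.1))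
          (all, nt)).2,
       (rules.foldl
          (fun (st : PySem.Set String × PySem.Set String) lr =>
            (lr.2.foldl PySem.Set.add (PySem.Set.add st.1 lr.1), PySem.Set.add st.2 lr.1))
          (all, nt)).1.filter
         (fun x =>
           !(rules.foldl
              (fun (st : PySem.Set String × PySem.Set String) lr =>
                (lr.2.foldl PySem.Set.add (PySem.Set.add st.1 lr.1), PySem.Set.add st.2 lr.1))
              (all, nt)).2.contains x)) := by
  induction rules generalizing all nt with
  | nil => rfl
  | cons lr rest ih =>
    rw [List.foldl_cons, List.foldl_cons]
    have hstep := pvStep nt all lr.1 lr.2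
    simp only []
    rw [hstep]
    exact ih (lr.2.foldl PySem.Set.add (PySem.Set.add all lr.1)) (PySem.Set.add nt lr.1)

-- ===== VERDICT (by name: the statement is the Claim_ definition above) =====
theorem get_non_terminals_and_terminals_spec : Claim_equal_get_non_terminals_and_terminals := by
  intro rules _
  unfold Spec_get_non_terminals_and_terminals
  unfold get_non_terminals_and_terminals get_non_terminals_and_terminals_alt
  have h := pvInv rules PySem.Set.empty PySem.Set.empty
  simp only [PySem.Set.diff]
  exact (h.symm : _)
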